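/- GENERATED by tools/from_farm_form.py from prooffarm-gif/accepted/GifFreeMapObject/Proof.lean (a worked proof of the farm's unit `GifFreeMapObject`,
   accepted by the verdict) — do not edit. -/
import Gif.Spec.Units.GifFreeMapObject

/-!
  `GifFreeMapObject` (0x107a80, 13 instructions; gifalloc.c:79-84) satisfies its HEAP-LEVEL contract, from the contract of `free`:

      entry ── test rdi, rdi ─┬─ (Object == NULL) ─ ret                                   nothing written
                              └─ push rbx ─ check ─ load Object->Colors ─ free(colors) ─ ret2 ─ free(Object) ─ ret3 ─ pop rbx ─ ret

  The first `free` is entered with the heap `H` (pre: `HeapPre.callee`), the second with `H.release colors` (pre: the first one's post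
  over the pushed return address, `HeapInv.writeLE_out`; `Object` is still live: `Heap.Live.release_ne`). The post is the second
  one's, restated at the caller's stack pointer (`HeapPre.raise_back`). The footprint: `u_same` through the two callees' footprints.
-/

open X86 X86.User Asan ProgX.Base ProgX.Base.Spec Gif.Spec

set_option maxRecDepth 4000
set_option maxHeartbeats 4000000

/-- `GifFreeMapObject` satisfies its contract: NULL does nothing; otherwise `Object->Colors` and `Object` are freed, in this order,
and every other object is as it was. -/
theorem Gif.Spec.Proved.GifFreeMapObject_ok : Gif.Spec.GifFreeMapObject.Statement := by
  intro Lay hLay μ hμ u₀ hcode h_free h_load8 H rest frames colors n u ret he hpre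
  v_entry he
  obtain ⟨hp, hcase⟩ := hpre
  have hbase := hp.base
  have hlimit := hp.limit
  by_cases h0 : (u.reg .rdi).toNat = 0
  · -- 0x107a80 `test rdi, rdi ; je` taken (gifalloc.c:80, Object == NULL): 0x107aa5 `ret`
    u_walk hcode [hμ.vendor] span [ProgX.Base.L.textLo, ProgX.Base.L.textHi] side (v_side)
    refine ReachVia.done ?_
    v_returned
    refine ⟨fun _ => ⟨?_, ?_, ?_⟩, fun hne => absurd h0 hne⟩
    · rw [w_mem]
      exact hp.inv
    · v_untouched
    · rw [w_mem]
      u_same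
  · have hobj : H.Live (u.reg .rdi).toNat 24 ∧ H.Live colors n ∧ colors ≠ (u.reg .rdi).toNat ∧
        ColorMapObject.Colors u.mem (u.reg .rdi).toNat = colors := by
      rcases hcase with hz | hobj
      · exact absurd hz h0
      · exact hobj
    clear hcase
    obtain ⟨hlive, hclive, hne, hcol⟩ := hobj
    simp only [gfield] at hcol
    -- where the two objects are: inside the heap's region [800040H, C00000H)
    obtain ⟨cap, hcap⟩ := hlive
    have hrg := hp.inv.heap.obj_range hcap
    have hin := hp.inv.heap.obj_inside hcap
    have hlive : H.Live (u.reg .rdi).toNat 24 := ⟨cap, hcap⟩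
    obtain ⟨ccap, hccap⟩ := hclive
    have hcrg := hp.inv.heap.obj_range hccap
    have hcin := hp.inv.heap.obj_inside hccap
    have hclive : H.Live colors n := ⟨ccap, hccap⟩
    rw [hbase] at hrg hcrg
    simp only at hrg hin hcrg hcin
    -- the load of `Object->Colors`, as a fact about the entry memory in the walker's form
    have l_colors : u.mem.readLE (u.reg .rdi + 0x10) 8 = colors := by
      rw [rd_eq_readLE u.mem (u.reg .rdi + 0x10) ((u.reg .rdi).toNat + 16) 8 (by u_omega)]
      exact hcol
    have hfree1 := h_free H rest frames n
    u_walk hcode [hμ.vendor] span [ProgX.Base.L.textLo, ProgX.Base.L.textHi] side (v_side)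
    case check_107a8d =>
      -- 0x107a8d (gifalloc.c:81): the load of `Object->Colors` lies inside the live 24-byte object
      have hun : ShadowUntouched u.mem s_107a8d.mem := by v_untouched
      have hl : LiveIn (H.liveObjs ++ rest) frames (u.reg .rdi).toNat 24 :=
        hlive.liveIn rest frames (Nat.le_refl _) (Nat.le_refl _)
      exact hl.accSmall hp.inv.shadow hun _ 8 (by decide) (by u_omega) (by u_omega)
    case call_inv =>
      v_inv
    case pre_107a96 =>
      -- 0x107a96 (gifalloc.c:81) `free(Object->Colors)`: the heap's precondition under the lower stack pointer; `colors` is live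
      have hun : ShadowUntouched u.mem s_107a96.mem := by v_untouched
      have hsame : Mem.EqOn H.base H.limit u.mem s_107a96.mem := by
        rw [hbase, hlimit, w_mem]
        u_eqon
      refine ⟨hp.callee hun hsame ?_ ?_ ?_, Or.inr ?_⟩
      · rw [w_rsp]
        u_omega
      · rw [w_rsp]
        u_omega
      · rw [w_rsp]
        u_omega
      · rw [w_rdi, toNat_ofNat_addr colors (by omega)]
        exact hclive
    -- 0x107a9b (ret2): `free(Object->Colors)` has returned: the heap is `H.release colors`
    have hc64 : (UInt64.ofNat colors).toNat = colors := toNat_ofNat_addr colors (by omega)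
    have hne1 : (s_107a96.reg .rdi).toNat ≠ 0 := by
      rw [w_rdi_107a96, hc64]
      omega
    have hinv1 := w_post.2 hne1
    rw [w_rdi_107a96, hc64] at hinv1
    clear w_post
    have e8 : (s_107a96.reg .rsp).toNat + 8 = (u.reg .rsp).toNat - 8 := by
      rw [w_rsp_107a96]
      u_omega
    rw [e8] at hinv1
    v_after_call w_rsp_107a96 w_mem_107a96
    simp only [shadowSpan, w_rdi_107a96, hc64] at w_same
    have hpbx : UInt64.ofNat (s_107a96.mem.readLE (u.reg .rsp - 8) 8) = u.reg .rbx := by u_resolve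
    rw [w_mem_107a96] at hpbx
    have hsbx : UInt64.ofNat (s_107a96r.mem.readLE (u.reg .rsp - 8) 8) = u.reg .rbx := by u_frame hpbx
    have hpra : UInt64.ofNat (s_107a96.mem.readLE (u.reg .rsp) 8) = ret := by u_resolve
    rw [w_mem_107a96] at hpra
    have hsra : UInt64.ofNat (s_107a96r.mem.readLE (u.reg .rsp) 8) = ret := by u_frame hpra
    have hsame : Mem.SameExcept [⟨(u.reg .rsp).toNat - 48, (u.reg .rsp).toNat⟩, ⟨colors - 24, colors - 16⟩,
        ⟨0xC00000 + colors / 8, 0xC00000 + (colors + n + 7) / 8⟩] u.mem s_107a96r.mem := by u_same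
    -- the second call is entered with the heap `H.release colors`, in which `Object` is still live
    clear hfree1
    have hfree2 := h_free (H.release colors) rest frames 24
    have hbase' : (H.release colors).base = 0x800000 := hbase
    have hlimit' : (H.release colors).limit = 0xC00000 := hlimit
    have hlive' : (H.release colors).Live (u.reg .rdi).toNat 24 := hlive.release_ne (Ne.symm hne)
    u_walk hcode [hμ.vendor] span [ProgX.Base.L.textLo, ProgX.Base.L.textHi] side (v_side)
    case call_inv =>
      v_inv
    case pre_107a9e =>
      -- 0x107a9e (gifalloc.c:82) `free(Object)`: the heap's invariant over the pushed return address
      have e_rsp : (s_107a9e.reg .rsp).toNat + 8 = (u.reg .rsp).toNat - 8 := by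
        rw [w_rsp]
        u_omega
      refine ⟨⟨?_, hbase', hlimit', hp.text, hp.offText⟩, Or.inr ?_⟩
      · rw [e_rsp, w_mem]
        exact hinv1.writeLE_out _ _ _ (by u_omega) (by rw [hbase']; left; u_omega) (by left; u_omega)
      · rw [w_rdi]
        exact hlive'
    -- 0x107aa3 (ret3): `free(Object)` has returned: the heap is `(H.release colors).release Object`
    have hne2 : (s_107a9e.reg .rdi).toNat ≠ 0 := by
      rw [w_rdi_107a9e]
      exact h0
    have hinv2 := w_post.2 hne2
    rw [w_rdi_107a9e] at hinv2
    clear w_post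
    have e8' : (s_107a9e.reg .rsp).toNat + 8 = (u.reg .rsp).toNat - 8 := by
      rw [w_rsp_107a9e]
      u_omega
    rw [e8'] at hinv2
    v_after_call w_rsp_107a9e w_mem_107a9e
    simp only [shadowSpan, w_rdi_107a9e] at w_same
    have hsbx2 : UInt64.ofNat (s_107a9er.mem.readLE (u.reg .rsp - 8) 8) = u.reg .rbx := by u_frame hsbx
    have hsra2 : UInt64.ofNat (s_107a9er.mem.readLE (u.reg .rsp) 8) = ret := by u_frame hsra
    have hsame2 : Mem.SameExcept [⟨(u.reg .rsp).toNat - 48, (u.reg .rsp).toNat⟩, ⟨colors - 24, colors - 16⟩,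
        ⟨0xC00000 + colors / 8, 0xC00000 + (colors + n + 7) / 8⟩,
        ⟨(u.reg .rdi).toNat - 24, (u.reg .rdi).toNat - 16⟩,
        ⟨0xC00000 + (u.reg .rdi).toNat / 8, 0xC00000 + ((u.reg .rdi).toNat + 24 + 7) / 8⟩] u.mem s_107a9er.mem := by u_same
    u_walk hcode [hμ.vendor] span [ProgX.Base.L.textLo, ProgX.Base.L.textHi] side (v_side)
    refine ReachVia.done ?_
    v_returned
    · -- the post: `Object ≠ NULL`; the invariant `free` states at its `rsp + 8`, restated at the caller's
      refine ⟨fun hz => absurd hz h0, fun _ => ?_⟩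
      rw [w_mem]
      exact hp.raise_back hinv2 (by omega)
    · -- same: the two headers' state words, the two objects' shadow, 48 bytes of stack
      simp only [X86.User.Spec.footprint, vspec, shadowSpan]
      rw [w_mem]
      exact hsame2
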